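-- pv_equiv track=rewrite | github.com/JMakkonen/Toy-Webcrawler-Python | P1060.py | strip_quotes
-- ===== SOURCE A (Python) =====
-- def strip_quotes(b):
--     c = ""
--     adding = False
--     for x in b:
--         if x == "\"":
--             if adding:
--                 break
--             else:
--                 adding = True
--         elif adding:
--             c = c + x
--     return c
-- ===== SOURCE B (Python) =====
-- def strip_quotes(b):
--     parts = b.split('"')
--     return parts[1] if len(parts) >= 2 else ""
-- ===== Notes on version B (the rewrite author's own statement) =====
-- stated objective: idiomatic
-- what changed: Replaces the char-by-char scan with a flag and quadratic string-concatenation accumulator by a single whole-string split on the quote character that picks the second field, defaulting to an empty string when there is no quote.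
import Mathlib
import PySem

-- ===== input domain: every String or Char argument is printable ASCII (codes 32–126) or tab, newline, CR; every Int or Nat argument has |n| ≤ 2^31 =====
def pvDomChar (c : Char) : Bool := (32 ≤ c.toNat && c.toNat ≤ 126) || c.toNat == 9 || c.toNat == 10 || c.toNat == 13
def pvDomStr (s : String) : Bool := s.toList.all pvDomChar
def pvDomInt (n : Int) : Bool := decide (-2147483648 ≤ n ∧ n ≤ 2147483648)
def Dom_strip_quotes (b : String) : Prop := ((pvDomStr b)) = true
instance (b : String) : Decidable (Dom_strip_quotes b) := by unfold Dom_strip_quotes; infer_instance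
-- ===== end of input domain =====

-- B replaces A's char-by-char scan with a flag by one split on '"' picking the second field (idiomatic; same cost).

-- ===== PORT A =====
-- scan with accumulator c and flag adding; 'break' modelled by returning c
def stripQuotesGo : List Char → List Char → Bool → List Char
  | [], c, _ => c
  | x :: xs, c, adding =>
    if x = '"' then
      if adding then c else stripQuotesGo xs c true
    else if adding then stripQuotesGo xs (c ++ [x]) true
    else stripQuotesGo xs c false

def strip_quotes (b : String) : String := String.mk (stripQuotesGo b.toList [] false)

-- ===== PORT B =====
-- parts = b.split('"'); return parts[1] if len(parts) >= 2 else ""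
def strip_quotes_alt (b : String) : String :=
  let parts := b.toList.splitOn '"'
  if 2 ≤ parts.length then String.mk (parts.getD 1 []) else ""

-- ===== PRECONDITION & SPEC =====
def Spec_strip_quotes (b : String) (out : String) : Prop := out = strip_quotes_alt b
instance (b : String) (out : String) : Decidable (Spec_strip_quotes b out) := by unfold Spec_strip_quotes; infer_instance

-- ===== CLAIM (what is proved, stated in full; the proofs are below) =====
def Claim_equal_strip_quotes : Prop := ∀ (b : String), Dom_strip_quotes b → Spec_strip_quotes b (strip_quotes b)

-- ===== LEMMAS AND PROOFS =====

-- adding phase: A copies characters until the next quote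
theorem go_true (cs : List Char) : ∀ c, stripQuotesGo cs c true = c ++ cs.takeWhile (fun x => !(x = '"')) := by
  induction cs with
  | nil => intro c; simp [stripQuotesGo]
  | cons x xs ih =>
    intro c
    by_cases hx : x = '"' <;> simp [stripQuotesGo, hx, ih]

-- the first field of splitOn is the prefix before the first quote
theorem splitOn_headI (cs : List Char) : (cs.splitOn '"').headI = cs.takeWhile (fun x => !(x = '"')) := by
  induction cs with
  | nil => rfl
  | cons x xs ih =>
    show ((x :: xs).splitOnP (· == '"')).headI = _
    rw [List.splitOnP_cons]
    by_cases hx : x = '"'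
    · simp [hx]
    · have hne : xs.splitOnP (· == '"') ≠ [] := List.splitOnP_ne_nil _ xs
      cases h : xs.splitOnP (· == '"') with
      | nil => exact absurd h hne
      | cons p ps =>
        simp only [List.modifyHead, List.headI, List.takeWhile_cons, hx]
        have := ih
        simp only [List.splitOn, h, List.headI] at this
        simp [hx, this]

theorem main_lemma (cs : List Char) :
    stripQuotesGo cs [] false =
      (if 2 ≤ (cs.splitOn '"').length then (cs.splitOn '"').getD 1 [] else []) := by
  induction cs with
  | nil => rfl
  | cons x xs ih =>
    show stripQuotesGo (x :: xs) [] false =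
      (if 2 ≤ ((x :: xs).splitOnP (· == '"')).length then ((x :: xs).splitOnP (· == '"')).getD 1 [] else [])
    rw [List.splitOnP_cons]
    by_cases hx : x = '"'
    · -- first quote: A enters the adding phase; parts gains a leading []
      have hne : xs.splitOnP (· == '"') ≠ [] := List.splitOnP_ne_nil _ xs
      have hlen : 1 ≤ (xs.splitOnP (· == '"')).length := by
        cases h : xs.splitOnP (· == '"') with
        | nil => exact absurd h hne
        | cons p ps => simp
      have h2 : 2 ≤ ([] :: xs.splitOnP (· == '"')).length := by simp; omega
      simp only [hx, stripQuotesGo]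
      rw [go_true]
      cases h : xs.splitOnP (· == '"') with
      | nil => exact absurd h hne
      | cons p ps =>
        have := splitOn_headI xs
        simp only [List.splitOn, h, List.headI] at this
        simp [this]
    · -- before any quote: the character goes into parts' head only; index 1 unchanged
      cases h : xs.splitOnP (· == '"') with
      | nil => exact absurd h (List.splitOnP_ne_nil _ xs)
      | cons p ps =>
        have ih' := ih
        simp only [List.splitOn, h] at ih'
        simp [stripQuotesGo, hx, ih']

-- ===== VERDICT (by name: the statement is the Claim_ definition above) =====
theorem strip_quotes_spec : Claim_equal_strip_quotes := by
  intro b _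
  show strip_quotes b = strip_quotes_alt b
  unfold strip_quotes strip_quotes_alt
  rw [main_lemma]
  by_cases h : 2 ≤ (b.toList.splitOn '"').length <;> simp [h] <;> rfl
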